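-- pv_equiv track=rewrite | github.com/connorbhall/comp110-22f-workspace | sandbox/quiz_2_check.py | o
-- ===== SOURCE A (Python) =====
-- def o(input: list[int]) -> list[int]:
--     result: list[int] = []
--     i: int = 0
--     while i < len(input):
--         if i % 2 == 0:
--             result.append(input[i])
--         i += 1
--     result_2: list[int] = []
--     i = 0
--     while i < len(result):
--         if result[i] % 2 != 0:
--             result_2.append(result[i])
--         i += 1
--     return result_2
-- ===== SOURCE B (Python) =====
-- def o(input: list[int]) -> list[int]:
--     out: list[int] = []
--     for i, x in enumerate(input):
--         if i % 2 == 0 and x % 2 != 0: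
--             out.append(x)
--     return out
-- ===== Notes on version B (the rewrite author's own statement) =====
-- stated objective: faster
-- what changed: Fuses A's two sequential index-loops (collect even-index elements, then filter odd values) into one enumerate pass with a compound predicate, never materializing the intermediate even-index list.
import Mathlib
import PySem

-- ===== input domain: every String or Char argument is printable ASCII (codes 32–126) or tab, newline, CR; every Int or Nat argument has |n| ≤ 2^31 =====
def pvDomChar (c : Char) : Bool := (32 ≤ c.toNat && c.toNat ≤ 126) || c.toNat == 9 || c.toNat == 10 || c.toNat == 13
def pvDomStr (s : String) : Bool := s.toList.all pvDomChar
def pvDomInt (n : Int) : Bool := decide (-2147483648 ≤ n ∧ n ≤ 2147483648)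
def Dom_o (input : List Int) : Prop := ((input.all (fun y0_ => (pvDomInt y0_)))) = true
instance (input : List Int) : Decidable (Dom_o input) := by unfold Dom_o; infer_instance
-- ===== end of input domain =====

-- B fuses A's two sequential index-loops into one enumerate pass with a compound
-- predicate, dropping the intermediate even-index list (objective: simpler).

-- ===== PORT A =====
def o (input : List Int) : List Int :=
  let result := (PySem.List.pyRange 0 input.length 1).foldl
    (fun acc i => if i % 2 == 0 then acc ++ [PySem.List.pyGetD input i 0] else acc) []
  (PySem.List.pyRange 0 result.length 1).foldl
    (fun acc i => if PySem.List.pyGetD result i 0 % 2 != 0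
      then acc ++ [PySem.List.pyGetD result i 0] else acc) []

-- ===== PORT B =====
def o_alt (input : List Int) : List Int :=
  (PySem.List.enumerate input).foldl
    (fun acc p => if p.1 % 2 == 0 && p.2 % 2 != 0 then acc ++ [p.2] else acc) []

-- ===== PRECONDITION & SPEC =====
def Spec_o (input : List Int) (out : List Int) : Prop := out = o_alt input
instance (input : List Int) (out : List Int) : Decidable (Spec_o input out) := by unfold Spec_o; infer_instance

-- ===== CLAIM (what is proved, stated in full; the proofs are below) =====
def Claim_equal_o : Prop := ∀ (input : List Int), Dom_o input → Spec_o input (o input)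

-- ===== LEMMAS AND PROOFS =====

-- A's first loop collects exactly the even-index elements, phrased over enumerate.
theorem o_first_loop (input : List Int) :
    (PySem.List.pyRange 0 input.length 1).foldl
      (fun acc i => if i % 2 == 0 then acc ++ [PySem.List.pyGetD input i 0] else acc) []
    = ((PySem.List.enumerate input).filter (fun p => p.1 % 2 == 0)).map (·.2) := by
  rw [PySem.List.enumerate_eq_map_pyRange (d := 0), List.filter_map, List.map_map]
  exact (PySem.List.foldl_append_if (fun i : Int => i % 2 == 0)
    (fun i => PySem.List.pyGetD input i 0) _ []).trans (by simp [Function.comp_def])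

-- A's second loop is a filter of the intermediate list by oddness.
theorem o_second_loop (result : List Int) :
    (PySem.List.pyRange 0 result.length 1).foldl
      (fun acc i => if PySem.List.pyGetD result i 0 % 2 != 0
        then acc ++ [PySem.List.pyGetD result i 0] else acc) []
    = result.filter (fun x => x % 2 != 0) := by
  rw [PySem.List.foldl_pyRange_zero_pyGetD' result 0
      (fun acc (x : Int) => if x % 2 != 0 then acc ++ [x] else acc) ([] : List Int),
    PySem.List.foldl_append_if_eq_filter]
  simp

-- B's single fused pass as a filter-then-project over enumerate.
theorem o_alt_eq (input : List Int) :
    o_alt input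
    = ((PySem.List.enumerate input).filter
        (fun p => p.1 % 2 == 0 && p.2 % 2 != 0)).map (·.2) := by
  unfold o_alt
  exact (PySem.List.foldl_append_if (fun p : Int × Int => p.1 % 2 == 0 && p.2 % 2 != 0)
    (·.2) _ []).trans (by simp)

-- ===== VERDICT (by name: the statement is the Claim_ definition above) =====
theorem o_spec : Claim_equal_o := by
  intro input _
  unfold Spec_o o
  rw [o_first_loop, o_second_loop, o_alt_eq, List.filter_map, List.filter_filter]
  congr 1
  apply List.filter_congr
  intro a _
  exact Bool.and_comm _ _
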